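-- pv_equiv track=rewrite | github.com/tannnmayy/NeuroRead.Mainsite | backend/app/services/simplification_engine.py | split_into_shorter
-- ===== SOURCE A (Python) =====
-- def split_into_shorter(sentence: str, max_words: int = 12) -> list[str]:
--     """Break a long sentence into chunks of max_words."""
--     words = sentence.split()
--     chunks = []
--     for i in range(0, len(words), max_words):
--         chunk = " ".join(words[i:i + max_words])
--         # Add period to chunks that don't end with punctuation
--         if chunk and chunk[-1] not in ".!?":
--             chunk += "."
--         chunks.append(chunk)
--     return chunks
-- ===== SOURCE B (Python) =====
-- def _finish(buf):
--     chunk = " ".join(buf)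
--     return chunk if chunk[-1] in ".!?" else chunk + "."
--
--
-- def split_into_shorter(sentence: str, max_words: int = 12) -> list[str]:
--     """Break a long sentence into chunks of max_words (single pass, word accumulator)."""
--     if max_words <= 0:
--         return []
--     chunks = []
--     buf = []
--     for w in sentence.split():
--         buf.append(w)
--         if len(buf) == max_words:
--             chunks.append(_finish(buf))
--             buf = []
--     if buf:
--         chunks.append(_finish(buf))
--     return chunks
-- ===== Notes on version B (the rewrite author's own statement) =====
-- stated objective: alternative
-- what changed: Replaces A's index-stepped range with slicing words[i:i+max_words] by a single left-to-right pass that accumulates words into a buffer and flushes it (join, punctuation fix-up) each time it reaches max_words, flushing the remainder at the end.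
import Mathlib
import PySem

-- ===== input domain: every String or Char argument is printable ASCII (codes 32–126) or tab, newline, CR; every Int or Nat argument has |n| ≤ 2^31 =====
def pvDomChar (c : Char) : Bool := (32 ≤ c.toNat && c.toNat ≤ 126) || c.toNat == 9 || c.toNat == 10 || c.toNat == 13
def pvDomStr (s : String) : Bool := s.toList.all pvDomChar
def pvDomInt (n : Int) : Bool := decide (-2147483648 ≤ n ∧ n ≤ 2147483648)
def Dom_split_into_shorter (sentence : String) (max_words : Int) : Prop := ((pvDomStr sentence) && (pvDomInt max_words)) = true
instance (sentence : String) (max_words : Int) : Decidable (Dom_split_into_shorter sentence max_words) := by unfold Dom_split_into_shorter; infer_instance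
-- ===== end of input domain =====

-- B replaces A's index-stepped slicing loop by one accumulator pass over the words; alternative decomposition, same cost.


-- ===== PORT A =====
-- 'if chunk and chunk[-1] not in ".!?": chunk += "."' — `chunk` is truthy iff chunk[-1] exists
def pvAddPeriod (chunk : String) : String :=
  match PySem.Str.pyGet? chunk (-1) with
  | none => chunk
  | some c => if c ∉ ['.', '!', '?'] then String.ofList (chunk.toList ++ ['.']) else chunk

def split_into_shorter (sentence : String) (max_words : Int) : List String :=
  let words := PySem.Str.split₀ sentence
  (PySem.List.pyRange 0 words.length max_words).foldl
    (fun chunks i =>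
      let chunk := PySem.Str.join " " (PySem.List.slice words (some i) (some (i + max_words)))
      chunks ++ [pvAddPeriod chunk])
    []

-- ===== PORT B =====
-- Source B's _finish; the `none` case (empty chunk, IndexError in Python) is unreachable at its call sites
def pvFinish (buf : List String) : String :=
  let chunk := PySem.Str.join " " buf
  match PySem.Str.pyGet? chunk (-1) with
  | some c => if c ∈ ['.', '!', '?'] then chunk else String.ofList (chunk.toList ++ ['.'])
  | none => String.ofList (chunk.toList ++ ['.'])

def split_into_shorter_alt (sentence : String) (max_words : Int) : List String :=
  if max_words ≤ 0 then []
  else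
    let st := (PySem.Str.split₀ sentence).foldl
      (fun (st : List String × List String) w =>
        let buf := st.2 ++ [w]
        if (buf.length : Int) = max_words then (st.1 ++ [pvFinish buf], []) else (st.1, buf))
      ([], [])
    if st.2.isEmpty then st.1 else st.1 ++ [pvFinish st.2]

-- ===== PRECONDITION & SPEC =====
-- Pre_ excludes exactly max_words = 0, where Python A raises ValueError (range() arg 3 must not be zero).
def Pre_split_into_shorter (sentence : String) (max_words : Int) : Prop := max_words ≠ 0
instance (sentence : String) (max_words : Int) : Decidable (Pre_split_into_shorter sentence max_words) := by unfold Pre_split_into_shorter; infer_instance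
def pvWitness_split_into_shorter : String × Int := ("hello world how are you today", 2)

def Spec_split_into_shorter (sentence : String) (max_words : Int) (out : List String) : Prop := out = split_into_shorter_alt sentence max_words
instance (sentence : String) (max_words : Int) (out : List String) : Decidable (Spec_split_into_shorter sentence max_words out) := by unfold Spec_split_into_shorter; infer_instance

-- ===== CLAIM (what is proved, stated in full; the proofs are below) =====
def Claim_equal_split_into_shorter : Prop := ∀ (sentence : String) (max_words : Int), Dom_split_into_shorter sentence max_words → Pre_split_into_shorter sentence max_words → Spec_split_into_shorter sentence max_words (split_into_shorter sentence max_words)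

-- ===== LEMMAS AND PROOFS =====

-- Reference chunker both ports are reduced to: chunk size m+1, structural recursion on the word list.
def pvChunks (m : Nat) (F : List String → String) : List String → List String
  | [] => []
  | w :: t => F ((w :: t).take (m + 1)) :: pvChunks m F (t.drop m)
termination_by ws => ws.length
decreasing_by simp

theorem pvChunks_congr (m : Nat) (F G : List String → String) :
    ∀ ws : List String, (∀ buf, buf ≠ [] → buf ⊆ ws → F buf = G buf) →
    pvChunks m F ws = pvChunks m G ws := by
  intro ws
  induction ws using pvChunks.induct m with
  | case1 => intro _; rw [pvChunks, pvChunks]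
  | case2 w t ih =>
    intro h
    rw [pvChunks, pvChunks, h _ (by simp) (List.take_subset _ _), ih]
    intro buf hne hsub
    exact h buf hne (fun x hx => List.mem_cons_of_mem w (List.drop_subset m t (hsub hx)))

-- the word buffers both finishers see are nonempty lists of nonempty words, so the chunk is nonempty
theorem join_ne_nil (buf : List String) (h : buf ≠ []) (hw : ∀ w ∈ buf, w.toList ≠ []) :
    (PySem.Str.join " " buf).toList ≠ [] := by
  rw [PySem.Str.toList_join]
  match buf with
  | [w] => rw [List.map_singleton, PySem.Chars.join_singleton]; exact hw w (by simp)
  | w :: v :: rest =>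
    rw [List.map_cons, List.map_cons, PySem.Chars.join_cons_cons]
    have := hw w (by simp)
    simp_all

theorem addPeriod_eq_finish (buf : List String) (h : buf ≠ []) (hw : ∀ w ∈ buf, w.toList ≠ []) :
    pvAddPeriod (PySem.Str.join " " buf) = pvFinish buf := by
  have hne := join_ne_nil buf h hw
  unfold pvAddPeriod pvFinish
  have : ∃ c, PySem.Str.pyGet? (PySem.Str.join " " buf) (-1) = some c := by
    cases heq : PySem.Str.pyGet? (PySem.Str.join " " buf) (-1) with
    | some c => exact ⟨c, rfl⟩
    | none =>
      exfalso
      rw [PySem.Str.pyGet?_eq, PySem.Chars.pyGet?_eq_listPyGet?, PySem.List.pyGet?_eq_none_iff] at heq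
      apply heq
      have : 1 ≤ (PySem.Str.join " " buf).toList.length := by
        cases hl : (PySem.Str.join " " buf).toList <;> simp_all
      unfold PySem.Raise.InRange
      omega
  obtain ⟨c, hc⟩ := this
  simp only [hc]
  by_cases hmem : c ∈ ['.', '!', '?']
  · rw [if_neg (by simp [hmem]), if_pos hmem]
  · rw [if_pos hmem, if_neg hmem]

theorem go_ne_nil : ∀ (s cur : List Char) (acc : List (List Char)),
    (∀ w ∈ acc, w ≠ ([] : List Char)) →
    ∀ w ∈ PySem.Chars.split₀.go s cur acc, w ≠ ([] : List Char) := by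
  intro s
  induction s with
  | nil =>
    intro cur acc hacc w hw
    rw [PySem.Chars.split₀.go] at hw
    split at hw
    · exact hacc w (List.mem_reverse.mp hw)
    · rename_i hcur
      rcases List.mem_cons.mp (List.mem_reverse.mp hw) with h | h
      · subst h; simp_all
      · exact hacc w h
  | cons c rest ih =>
    intro cur acc hacc w hw
    rw [PySem.Chars.split₀.go] at hw
    split at hw
    · split at hw
      · exact ih [] acc hacc w hw
      · refine ih [] _ ?_ w hw
        intro v hv
        rcases List.mem_cons.mp hv with h | h
        · subst h; simp_all
        · exact hacc v h
    · exact ih (c :: cur) acc hacc w hw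

theorem split₀_ne_nil (s : String) : ∀ w ∈ PySem.Str.split₀ s, w.toList ≠ [] := by
  intro w hw
  unfold PySem.Str.split₀ at hw
  obtain ⟨cs, hcs, rfl⟩ := List.mem_map.mp hw
  rw [String.toList_ofList]
  exact go_ne_nil s.toList [] [] (by simp) cs hcs

theorem mapA_eq_pvChunks (m : Nat) (F : List String → String) :
    ∀ ws : List String,
      (List.range ((ws.length + m) / (m + 1))).map (fun k => F ((ws.drop ((m + 1) * k)).take (m + 1)))
        = pvChunks m F ws := by
  intro ws
  induction ws using pvChunks.induct m with
  | case1 => rw [pvChunks]; simp [Nat.div_eq_of_lt]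
  | case2 w t ih =>
    rw [pvChunks]
    have hcnt : ((w :: t).length + m) / (m + 1) = t.length / (m + 1) + 1 := by
      simp only [List.length_cons]
      rw [show t.length + 1 + m = t.length + (m + 1) by omega, Nat.add_div_right _ (Nat.succ_pos m)]
    rw [hcnt, List.range_succ_eq_map, List.map_cons]
    congr 1
    · rw [List.map_map]
      have hlen : ((t.drop m).length + m) / (m + 1) = t.length / (m + 1) := by
        rw [List.length_drop]
        rcases Nat.le_total m t.length with h | h
        · rw [Nat.sub_add_cancel h]
        · rw [Nat.sub_eq_zero_of_le h, Nat.zero_add, Nat.div_eq_of_lt (by omega),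
            Nat.div_eq_of_lt (by omega)]
      rw [← ih, hlen]
      apply List.map_congr_left
      intro k _
      simp only [Function.comp]
      congr 2
      rw [show (m + 1) * (k + 1) = (m + 1) + (m + 1) * k by ring, ← List.drop_drop,
        List.drop_succ_cons]

theorem A_eq_pvChunks (sentence : String) (m : Nat) :
    split_into_shorter sentence ((m : Int) + 1)
      = pvChunks m (fun buf => pvAddPeriod (PySem.Str.join " " buf)) (PySem.Str.split₀ sentence) := by
  simp only [split_into_shorter]
  rw [PySem.List.foldl_append_singleton_eq_map, List.nil_append]
  rw [PySem.List.pyRange_of_pos 0 _ (by omega : (0:Int) < (m:Int)+1)]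
  rw [List.map_map]
  rw [← mapA_eq_pvChunks m _ (PySem.Str.split₀ sentence)]
  have hcnt : (if (0:Int) < ((PySem.Str.split₀ sentence).length : Int)
        then ((((PySem.Str.split₀ sentence).length : Int) - 0 + ((m:Int)+1) - 1) / ((m:Int)+1)).toNat
        else 0)
      = ((PySem.Str.split₀ sentence).length + m) / (m + 1) := by
    set n := (PySem.Str.split₀ sentence).length with hn
    by_cases h0 : (0:Int) < (n:Int)
    · rw [if_pos h0]
      rw [show ((n:Int) - 0 + ((m:Int)+1) - 1) = ((n + m : Nat) : Int) by push_cast; ring]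
      rw [show ((m:Int)+1) = ((m+1 : Nat) : Int) by push_cast; ring]
      norm_cast
    · rw [if_neg h0]
      have : n = 0 := by omega
      rw [this]
      simp [Nat.div_eq_of_lt]
  rw [hcnt]
  apply List.map_congr_left
  intro k _
  have hs : PySem.List.slice (PySem.Str.split₀ sentence) (some (0 + ((m:Int)+1) * (k:Int)))
        (some (0 + ((m:Int)+1) * (k:Int) + ((m:Int)+1)))
      = ((PySem.Str.split₀ sentence).drop ((m+1)*k)).take (m+1) := by
    rw [show (0 + ((m:Int)+1) * (k:Int)) = (((m+1)*k : Nat) : Int) by push_cast; ring,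
      show ((((m+1)*k : Nat) : Int) + ((m:Int)+1)) = ((((m+1)*k : Nat)) : Int) + (((m+1) : Nat) : Int) by push_cast; ring,
      PySem.List.slice_natCast_add]
  simp only [Function.comp_apply]
  rw [hs]

theorem A_neg (sentence : String) (mw : Int) (h : mw < 0) : split_into_shorter sentence mw = [] := by
  simp only [split_into_shorter]
  have : PySem.List.pyRange 0 ((PySem.Str.split₀ sentence).length : Int) mw = [] := by
    unfold PySem.List.pyRange
    rw [if_neg (by omega)]
    simp only
    rw [if_neg (by omega), if_neg (by omega)]
    simp
  rw [this]
  rfl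

theorem pvChunks_cons_eq (m : Nat) (F : List String → String) (ls : List String) (h : ls ≠ []) :
    pvChunks m F ls = F (ls.take (m + 1)) :: pvChunks m F (ls.drop (m + 1)) := by
  match ls with
  | w :: t => rw [pvChunks, List.drop_succ_cons]

theorem B_go (m : Nat) : ∀ (ws buf chunks : List String), buf.length ≤ m →
    (let st := List.foldl (fun (st : List String × List String) w =>
        let buf := st.2 ++ [w]
        if (buf.length : Int) = (m : Int) + 1 then (st.1 ++ [pvFinish buf], []) else (st.1, buf))
      (chunks, buf) ws
    if st.2.isEmpty then st.1 else st.1 ++ [pvFinish st.2])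
    = chunks ++ pvChunks m pvFinish (buf ++ ws) := by
  intro ws
  induction ws with
  | nil =>
    intro buf chunks hle
    simp only [List.foldl_nil, List.append_nil]
    match buf with
    | [] => rw [pvChunks]; simp
    | b :: t =>
      rw [pvChunks]
      have h1 : (b :: t).take (m + 1) = b :: t :=
        List.take_of_length_le (by simp at hle ⊢; omega)
      have h2 : t.drop m = [] :=
        List.drop_eq_nil_of_le (by simp at hle; omega)
      rw [h1, h2, pvChunks]
      simp
  | cons w ws' ih =>
    intro buf chunks hle
    simp only [List.foldl_cons]
    by_cases hb : ((buf ++ [w]).length : Int) = (m : Int) + 1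
    · rw [if_pos hb]
      rw [ih [] (chunks ++ [pvFinish (buf ++ [w])]) (Nat.zero_le m)]
      have hlen : (buf ++ [w]).length = m + 1 := by exact_mod_cast hb
      have hrhs : pvChunks m pvFinish ((buf ++ [w]) ++ ws')
          = pvFinish (buf ++ [w]) :: pvChunks m pvFinish ws' := by
        rw [pvChunks_cons_eq m pvFinish _ (by simp), ← hlen, List.take_left, List.drop_left]
      rw [show buf ++ w :: ws' = (buf ++ [w]) ++ ws' by simp, hrhs]
      simp
    · rw [if_neg hb]
      rw [ih (buf ++ [w]) chunks (by simp at hb ⊢; omega)]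
      simp

theorem B_eq_pvChunks (sentence : String) (m : Nat) :
    split_into_shorter_alt sentence ((m : Int) + 1)
      = pvChunks m pvFinish (PySem.Str.split₀ sentence) := by
  simp only [split_into_shorter_alt]
  rw [if_neg (by omega)]
  simpa using B_go m (PySem.Str.split₀ sentence) [] [] (Nat.zero_le m)

-- ===== VERDICT (by name: the statement is the Claim_ definition above) =====
theorem split_into_shorter_spec : Claim_equal_split_into_shorter := by
  intro s mw _ hpre
  unfold Spec_split_into_shorter
  rcases lt_trichotomy mw 0 with hneg | hz | hpos
  · rw [A_neg s mw hneg]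
    unfold split_into_shorter_alt
    rw [if_pos (le_of_lt hneg)]
  · exact absurd hz hpre
  · obtain ⟨m, rfl⟩ : ∃ m : Nat, mw = (m : Int) + 1 := by
      refine ⟨(mw - 1).toNat, ?_⟩; omega
    rw [A_eq_pvChunks, B_eq_pvChunks]
    exact pvChunks_congr m _ _ _ (fun buf hne hsub =>
      addPeriod_eq_finish buf hne (fun w hw => split₀_ne_nil s w (hsub hw)))
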